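-- pv_equiv track=rewrite | github.com/miliar/Code_Jam_Webscraper | solutions_python/solutions_year10_round0_nr1/527.py | find_snap_th_light
-- ===== SOURCE A (Python) =====
-- def find_snap_th_light(snappers):
--     if snappers == 1:
--         return 1
--
--     snaps = 0
--     chain = [0 for i in range(snappers)]
--     while True:
--         snaps += 1
--         flow = True
--         for i in range(snappers):
--             if not flow:
--                 break
--             else:
--                 if chain[i]==0:
--                     chain[i] = 1
--                     if i == snappers-1:
--                         return snaps + 1
--                     break
--                 else:
--                     chain[i] = 0
-- ===== SOURCE B (Python) =====
-- def find_snap_th_light(snappers):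
--     # Closed form: the simulated binary counter first sets its top bit after
--     # 2**(snappers-1) increments, and A returns that count plus one.
--     if snappers == 1:
--         return 1
--     return 2 ** (snappers - 1) + 1
-- ===== Notes on version B (the rewrite author's own statement) =====
-- stated objective: faster
-- what changed: Replaces the exponential simulation of a binary counter (increment a bit-list until the top bit is set) by the closed form 2**(snappers-1)+1; intended as faster: a timing run measured A timing out at n=16 where B returned instantly (no ratio measurable).
import Mathlib
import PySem

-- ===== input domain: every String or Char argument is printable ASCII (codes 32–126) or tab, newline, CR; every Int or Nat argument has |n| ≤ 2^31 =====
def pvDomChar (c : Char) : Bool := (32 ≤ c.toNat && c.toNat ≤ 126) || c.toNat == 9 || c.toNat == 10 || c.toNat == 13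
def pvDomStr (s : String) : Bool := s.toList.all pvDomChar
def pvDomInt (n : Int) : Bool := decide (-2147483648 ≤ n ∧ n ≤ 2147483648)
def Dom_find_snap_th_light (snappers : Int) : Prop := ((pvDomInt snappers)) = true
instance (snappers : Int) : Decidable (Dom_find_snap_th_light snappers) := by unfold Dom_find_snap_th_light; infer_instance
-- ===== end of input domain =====

-- B replaces A's exponential binary-counter simulation by the closed form 2^(snappers-1)+1;
-- intended as faster: a timing run measured A timing out at n=16 where B returned (no ratio measurable).

-- ===== PORT A =====
-- A's inner `for i in range(snappers)` pass over the chain: sets the first 0-bit to 1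
-- (returning none if that bit is the last one, = Python's `return snaps + 1`),
-- clearing the 1-bits it passes; falling off the end leaves all bits cleared.
def pvStep : List Int → Option (List Int)
  | [] => some []
  | x :: rest =>
    if x = 0 then (if rest = [] then none else some (1 :: rest))
    else match pvStep rest with
      | none => none
      | some r => some (0 :: r)

-- A's `while True` loop (snaps += 1 each pass); fuel only makes the recursion total,
-- it is large enough to never run out on inputs admitted by Pre_.
def pvLoopA : Nat → List Int → Int → Int
  | 0, _, _ => 0
  | fuel + 1, chain, snaps =>
    match pvStep chain with
    | none => (snaps + 1) + 1
    | some c => pvLoopA fuel c (snaps + 1)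

def find_snap_th_light (snappers : Int) : Int :=
  if snappers = 1 then 1
  else pvLoopA (2 ^ snappers.toNat) (List.replicate snappers.toNat 0) 0

-- ===== PORT B =====
def find_snap_th_light_alt (snappers : Int) : Int :=
  if snappers = 1 then 1 else 2 ^ (snappers - 1).toNat + 1

-- ===== PRECONDITION & SPEC =====
-- Pre_ excludes non-positive snappers, where A's `while True` loop never terminates (A returns no value there).
def Pre_find_snap_th_light (snappers : Int) : Prop := 1 ≤ snappers
instance (snappers : Int) : Decidable (Pre_find_snap_th_light snappers) := by unfold Pre_find_snap_th_light; infer_instance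
def pvWitness_find_snap_th_light : Int := (3)
def Spec_find_snap_th_light (snappers : Int) (out : Int) : Prop := out = find_snap_th_light_alt snappers
instance (snappers : Int) (out : Int) : Decidable (Spec_find_snap_th_light snappers out) := by unfold Spec_find_snap_th_light; infer_instance

-- ===== CLAIM (what is proved, stated in full; the proofs are below) =====
def Claim_equal_find_snap_th_light : Prop := ∀ (snappers : Int), Dom_find_snap_th_light snappers → Pre_find_snap_th_light snappers → Spec_find_snap_th_light snappers (find_snap_th_light snappers)

-- ===== LEMMAS AND PROOFS =====

-- little-endian n-bit representation of k
def pvRep : Nat → Nat → List Int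
  | 0, _ => []
  | n + 1, k => ((k % 2 : Nat) : Int) :: pvRep n (k / 2)

theorem pvRep_zero (n : Nat) : pvRep n 0 = List.replicate n 0 := by
  induction n with
  | zero => rfl
  | succ n ih => simp [pvRep, ih, List.replicate]

theorem pvStep_none (n : Nat) : pvStep (pvRep (n + 1) (2 ^ n - 1)) = none := by
  induction n with
  | zero => rfl
  | succ n ih =>
    have h1 : (2 ^ (n + 1) - 1) % 2 = 1 := by
      have h : 2 ^ (n + 1) = 2 * 2 ^ n := by ring
      have hp : 1 ≤ 2 ^ n := Nat.one_le_two_pow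
      omega
    have h2 : (2 ^ (n + 1) - 1) / 2 = 2 ^ n - 1 := by
      have h : 2 ^ (n + 1) = 2 * 2 ^ n := by ring
      have hp : 1 ≤ 2 ^ n := Nat.one_le_two_pow
      omega
    have hr : pvRep (n + 2) (2 ^ (n + 1) - 1) = (1 : Int) :: pvRep (n + 1) (2 ^ n - 1) := by
      simp [pvRep, h1, h2]
    rw [hr, pvStep]
    simp [ih]

theorem pvStep_some (n : Nat) : ∀ k : Nat, k + 2 ≤ 2 ^ n →
    pvStep (pvRep (n + 1) k) = some (pvRep (n + 1) (k + 1)) := by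
  induction n with
  | zero => intro k hk; omega
  | succ n ih =>
    intro k hk
    rcases Nat.even_or_odd k with he | ho
    · obtain ⟨m, hm⟩ := he
      have h1 : k % 2 = 0 := by omega
      have h2 : (k + 1) % 2 = 1 := by omega
      have h3 : (k + 1) / 2 = k / 2 := by omega
      have hne : pvRep (n + 1) (k / 2) ≠ [] := by simp [pvRep]
      have hr : pvRep (n + 2) k = (0 : Int) :: pvRep (n + 1) (k / 2) := by simp [pvRep, h1]
      have hr' : pvRep (n + 2) (k + 1) = (1 : Int) :: pvRep (n + 1) (k / 2) := by
        simp [pvRep, h2, h3]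
      rw [hr, hr', pvStep]
      simp [hne]
    · obtain ⟨m, hm⟩ := ho
      have h1 : k % 2 = 1 := by omega
      have h2 : (k + 1) % 2 = 0 := by omega
      have h3 : (k + 1) / 2 = k / 2 + 1 := by omega
      have hrec : k / 2 + 2 ≤ 2 ^ n := by
        have : 2 ^ (n + 1) = 2 * 2 ^ n := by ring
        omega
      have hr : pvRep (n + 2) k = (1 : Int) :: pvRep (n + 1) (k / 2) := by simp [pvRep, h1]
      have hr' : pvRep (n + 2) (k + 1) = (0 : Int) :: pvRep (n + 1) (k / 2 + 1) := by
        simp [pvRep, h2, h3]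
      rw [hr, hr', pvStep]
      simp [ih (k / 2) hrec]

theorem pvLoop_eval (n : Nat) : ∀ (m k : Nat) (fuel : Nat) (snaps : Int),
    k + m = 2 ^ n - 1 → m < fuel →
    pvLoopA fuel (pvRep (n + 1) k) snaps = snaps + (m : Int) + 2 := by
  intro m
  induction m with
  | zero =>
    intro k fuel snaps hk hf
    obtain ⟨f, rfl⟩ : ∃ f, fuel = f + 1 := ⟨fuel - 1, by omega⟩
    have hk' : k = 2 ^ n - 1 := by omega
    subst hk'
    simp [pvLoopA, pvStep_none n]
    ring
  | succ m ih =>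
    intro k fuel snaps hk hf
    obtain ⟨f, rfl⟩ : ∃ f, fuel = f + 1 := ⟨fuel - 1, by omega⟩
    have hp : 1 ≤ 2 ^ n := Nat.one_le_two_pow
    have hstep := pvStep_some n k (by omega)
    have ihv := ih (k + 1) f (snaps + 1) (by omega) (by omega)
    simp [pvLoopA, hstep, ihv]
    ring

-- ===== VERDICT (by name: the statement is the Claim_ definition above) =====
theorem find_snap_th_light_spec : Claim_equal_find_snap_th_light := by
  intro snappers _ hpre
  unfold Spec_find_snap_th_light find_snap_th_light find_snap_th_light_alt
  by_cases h1 : snappers = 1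
  · simp [h1]
  · simp only [h1, if_false]
    have h2 : 2 ≤ snappers := by
      unfold Pre_find_snap_th_light at hpre; omega
    obtain ⟨n, hn⟩ : ∃ n : Nat, snappers.toNat = n + 1 := ⟨snappers.toNat - 1, by omega⟩
    have hp : 1 ≤ 2 ^ n := Nat.one_le_two_pow
    have hfuel : 2 ^ n - 1 < 2 ^ (n + 1) := by
      have h : 2 ^ (n + 1) = 2 * 2 ^ n := by ring
      omega
    have hrep : List.replicate snappers.toNat (0 : Int) = pvRep (n + 1) 0 := by
      rw [hn, pvRep_zero]
    have htn : (snappers - 1).toNat = n := by omega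
    rw [hrep, hn, htn, pvLoop_eval n (2 ^ n - 1) 0 (2 ^ (n + 1)) 0 (by omega) hfuel]
    push_cast [Nat.cast_sub hp]
    ring
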